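-- pv_equiv track=rewrite | github.com/ubccr/xdmod-value-analytics | tools/viz_samples/sankey.py | get_storage_user_count
-- ===== SOURCE A (Python) =====
-- from collections import defaultdict, Counter
--
-- def get_storage_user_count(stor):
--     r = defaultdict(set)
--     for j in stor:
--         r[j['system']].add(j['user'])
--     c = Counter()
--     for k, v in r.items():
--         c[k] = len(v)
--     return c
-- ===== SOURCE B (Python) =====
-- from collections import Counter
--
-- def get_storage_user_count(stor):
--     c = Counter()
--     done = []
--     for j in stor:
--         p = (j['system'], j['user'])
--         if p not in done:
--             c[p[0]] += 1
--         done.append(p)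
--     return c
-- ===== Notes on version B (the rewrite author's own statement) =====
-- stated objective: alternative
-- what changed: Replaces A's hash-based grouping (defaultdict of per-system user sets plus a second len() pass) with a hash-free brute-force single loop: each record is counted iff its (system,user) pair does not occur among the earlier records, tested by a linear scan of the list of all previously seen pairs.
import Mathlib
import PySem

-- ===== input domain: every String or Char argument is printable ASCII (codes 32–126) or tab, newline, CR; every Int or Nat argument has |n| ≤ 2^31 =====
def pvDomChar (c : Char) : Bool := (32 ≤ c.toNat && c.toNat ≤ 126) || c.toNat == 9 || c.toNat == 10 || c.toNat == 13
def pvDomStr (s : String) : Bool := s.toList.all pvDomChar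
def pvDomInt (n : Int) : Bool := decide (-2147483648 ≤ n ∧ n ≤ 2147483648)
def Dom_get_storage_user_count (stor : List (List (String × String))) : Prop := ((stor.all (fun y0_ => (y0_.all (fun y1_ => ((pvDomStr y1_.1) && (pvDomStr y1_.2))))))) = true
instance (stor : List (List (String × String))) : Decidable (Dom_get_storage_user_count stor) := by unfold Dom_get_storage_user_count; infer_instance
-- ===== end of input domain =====

-- B replaces A's hash-based grouping (dict of per-system user sets plus a len() pass) with a
-- hash-free brute-force loop: a record is counted iff its (system,user) pair is not among the
-- earlier records, tested by a linear scan of the list of all previous pairs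
-- (objective: alternative algorithm; B is quadratic, not faster).

-- j['system'] / j['user']: exact under Pre_ (both keys present); getD's default is never used there.
def pvSysOf (j : List (String × String)) : String := (PySem.Dict.mk j).getD "system" ""
def pvUsrOf (j : List (String × String)) : String := (PySem.Dict.mk j).getD "user" ""

-- ===== PORT A =====
def pvAStep (r : PySem.Dict String (PySem.Set String)) (j : List (String × String)) :
    PySem.Dict String (PySem.Set String) :=
  r.insert (pvSysOf j) (PySem.Set.add (r.getD (pvSysOf j) PySem.Set.empty) (pvUsrOf j))

def get_storage_user_count (stor : List (List (String × String))) : List (String × Int) :=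
  let r := stor.foldl pvAStep PySem.Dict.empty
  let c := r.items.foldl (fun c kv => c.insert kv.1 (PySem.Set.len kv.2)) PySem.Dict.empty
  c.items

-- ===== PORT B =====
def pvBStep (st : List (String × String) × PySem.Dict String Int)
    (j : List (String × String)) : List (String × String) × PySem.Dict String Int :=
  let p := (pvSysOf j, pvUsrOf j)
  let c := if st.1.contains p then st.2 else st.2.modify p.1 0 (· + 1)
  (st.1 ++ [p], c)

def get_storage_user_count_alt (stor : List (List (String × String))) : List (String × Int) :=
  (stor.foldl pvBStep ([], PySem.Dict.empty)).2.items

-- ===== PRECONDITION & SPEC =====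
-- Pre_ excludes exactly the inputs where A raises KeyError: a record missing 'system' or 'user'.
def Pre_get_storage_user_count (stor : List (List (String × String))) : Prop :=
  ∀ j ∈ stor, (PySem.Dict.mk j).contains "system" = true ∧ (PySem.Dict.mk j).contains "user" = true
instance (stor : List (List (String × String))) : Decidable (Pre_get_storage_user_count stor) := by
  unfold Pre_get_storage_user_count; infer_instance

def pvWitness_get_storage_user_count : (List (List (String × String))) :=
  [[("system", "a"), ("user", "b")], [("system", "a"), ("user", "c")]]

def Spec_get_storage_user_count (stor : List (List (String × String))) (out : List (String × Int)) : Prop := out = get_storage_user_count_alt stor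
instance (stor : List (List (String × String))) (out : List (String × Int)) : Decidable (Spec_get_storage_user_count stor out) := by unfold Spec_get_storage_user_count; infer_instance

-- ===== CLAIM (what is proved, stated in full; the proofs are below) =====
def Claim_equal_get_storage_user_count : Prop := ∀ (stor : List (List (String × String))), Dom_get_storage_user_count stor → Pre_get_storage_user_count stor → Spec_get_storage_user_count stor (get_storage_user_count stor)

-- ===== LEMMAS AND PROOFS =====

-- Joint invariant: A's dict-of-sets r against B's list of all previous pairs and its counter.
def pvInv (r : PySem.Dict String (PySem.Set String)) (done : List (String × String))
    (c : PySem.Dict String Int) : Prop :=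
  r.keys.Nodup ∧
  (∀ s u, ((s, u) ∈ done) ↔ u ∈ r.getD s PySem.Set.empty) ∧
  c.items = r.items.map (fun kv => (kv.1, PySem.Set.len kv.2))

theorem pvInv_keys_eq {r : PySem.Dict String (PySem.Set String)} {done : List (String × String)}
    {c : PySem.Dict String Int} (h : pvInv r done c) : c.keys = r.keys := by
  simp only [PySem.Dict.keys, h.2.2, List.map_map]
  rfl

theorem pv_insert_getD_self {ν : Type} (d : PySem.Dict String ν) (k : String) (dflt : ν)
    (hnd : d.keys.Nodup) (hc : d.contains k = true) : d.insert k (d.getD k dflt) = d := by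
  apply PySem.Dict.ext
  rw [PySem.Dict.items_insert_of_contains d _ hc]
  conv_rhs => rw [← List.map_id d.items]
  apply List.map_congr_left
  intro p hp
  by_cases hk : p.1 = k
  · have hget : d.get? p.1 = some p.2 := PySem.Dict.get?_of_mem_items d hp hnd
    have hpv : d.getD k dflt = p.2 := by
      rw [← hk, PySem.Dict.getD_eq_get?_getD, hget]; rfl
    simp [hk, hpv, Prod.ext_iff]
  · simp [hk]

theorem pvInv_step (r : PySem.Dict String (PySem.Set String)) (done : List (String × String))
    (c : PySem.Dict String Int) (j : List (String × String)) (h : pvInv r done c) :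
    pvInv (pvAStep r j) (pvBStep (done, c) j).1 (pvBStep (done, c) j).2 := by
  obtain ⟨hnd, hmem, hitems⟩ := h
  set s := pvSysOf j with hs
  set u := pvUsrOf j with hu
  by_cases hp : done.contains (s, u) = true
  · -- pair already seen earlier: A's dict and B's counter are unchanged; done gains a duplicate
    have hmu : u ∈ r.getD s PySem.Set.empty := by
      rw [← hmem]
      simpa [List.contains_iff_mem] using hp
    have hcu : (r.getD s PySem.Set.empty).contains u = true := by
      simpa [List.contains_iff_mem] using hmu
    have hconts : r.contains s = true := by
      by_contra hns
      rw [PySem.Dict.getD_of_not_contains r _ (by simpa using hns)] at hmu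
      simp [PySem.Set.empty] at hmu
    have hA : pvAStep r j = r := by
      unfold pvAStep
      rw [← hs, ← hu, PySem.Set.add, if_pos hcu]
      exact pv_insert_getD_self r s PySem.Set.empty hnd hconts
    have hB : pvBStep (done, c) j = (done ++ [(s, u)], c) := by
      unfold pvBStep
      simp only [← hs, ← hu]
      rw [if_pos hp]
    rw [hA, hB]
    refine ⟨hnd, ?_, hitems⟩
    intro s' u'
    rw [List.mem_append, List.mem_singleton, ← hmem]
    constructor
    · rintro (h' | h')
      · exact h'
      · rw [h', hmem, Prod.mk.injEq] at *
        rw [← hmem]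
        exact (by simpa [List.contains_iff_mem] using hp)
    · exact Or.inl
  · -- new pair
    have hnmem : u ∉ r.getD s PySem.Set.empty := by
      rw [← hmem]
      intro hc'
      exact hp (by simpa [List.contains_iff_mem] using hc')
    have hcu : (r.getD s PySem.Set.empty).contains u = false := by
      simpa [List.contains_iff_mem] using hnmem
    have hB : pvBStep (done, c) j = (done ++ [(s, u)], c.modify s 0 (· + 1)) := by
      unfold pvBStep
      simp only [← hs, ← hu]
      rw [if_neg hp]
    have hAdef : pvAStep r j
        = r.insert s (r.getD s PySem.Set.empty ++ [u]) := by
      unfold pvAStep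
      rw [← hs, ← hu, PySem.Set.add, if_neg (by rw [Bool.not_eq_true]; exact hcu)]
    rw [hB, hAdef]
    refine ⟨PySem.Dict.nodup_keys_insert r s _ hnd, ?_, ?_⟩
    · intro s' u'
      rw [List.mem_append, List.mem_singleton, PySem.Dict.getD_insert]
      by_cases hss : s' = s
      · subst hss
        rw [if_pos rfl]
        simp only [List.mem_append, List.mem_singleton, hmem, Prod.mk.injEq]
        tauto
      · rw [if_neg hss]
        simp only [hmem, Prod.mk.injEq]
        tauto
    · -- counter side
      have hckeys : c.keys = r.keys := pvInv_keys_eq ⟨hnd, hmem, hitems⟩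
      have hcnd : c.keys.Nodup := hckeys ▸ hnd
      have hccont : c.contains s = r.contains s := by
        by_cases hrc : r.contains s = true
        · rw [hrc, PySem.Dict.contains_iff_mem_keys, hckeys,
            ← PySem.Dict.contains_iff_mem_keys]; exact hrc
        · simp only [Bool.not_eq_true] at hrc
          rw [hrc, ← Bool.not_eq_true, PySem.Dict.contains_iff_mem_keys, hckeys,
            ← PySem.Dict.contains_iff_mem_keys, Bool.not_eq_true]; exact hrc
      rw [PySem.Dict.modify]
      by_cases hrc : r.contains s = true
      · -- existing system: both replace the entry at s in place
        have hvmem : (s, r.getD s PySem.Set.empty) ∈ r.items := by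
          have := PySem.Dict.get?_eq_none_iff_contains (d := r) (k := s)
          rcases hg : r.get? s with _ | v
          · rw [PySem.Dict.contains_eq_isSome_get?, hg] at hrc; simp at hrc
          · have : r.getD s PySem.Set.empty = v := by
              rw [PySem.Dict.getD_eq_get?_getD, hg]; rfl
            rw [this]
            exact PySem.Dict.mem_items_of_get?_eq_some r hg
        have hcgetD : c.getD s 0 = PySem.Set.len (r.getD s PySem.Set.empty) := by
          apply PySem.Dict.getD_of_mem_items c _ hcnd
          rw [hitems]
          exact List.mem_map_of_mem hvmem
        rw [PySem.Dict.items_insert_of_contains c _ (hccont ▸ hrc),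
          PySem.Dict.items_insert_of_contains r _ hrc, hitems, hcgetD, List.map_map, List.map_map]
        apply List.map_congr_left
        intro p hp'
        by_cases hk : p.1 = s
        · have hget : r.get? p.1 = some p.2 := PySem.Dict.get?_of_mem_items r hp' hnd
          have hpv : p.2 = r.getD s PySem.Set.empty := by
            rw [PySem.Dict.getD_eq_get?_getD, ← hk, hget]; rfl
          simp [Function.comp, hk, PySem.Set.len]
        · simp [Function.comp, hk]
      · -- new system: both append
        have hrc' : r.contains s = false := by simpa using hrc
        have hcc' : c.contains s = false := by rw [hccont]; exact hrc'
        have hgd : r.getD s PySem.Set.empty = PySem.Set.empty :=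
          PySem.Dict.getD_of_not_contains r _ hrc'
        have hcgd : c.getD s 0 = 0 := PySem.Dict.getD_of_not_contains c _ hcc'
        rw [PySem.Dict.items_insert_of_not_contains c _ hcc',
          PySem.Dict.items_insert_of_not_contains r _ hrc', hitems, hcgd, hgd, List.map_append]
        simp [PySem.Set.len, PySem.Set.empty]

theorem pvInv_fold (stor : List (List (String × String)))
    (r : PySem.Dict String (PySem.Set String)) (done : List (String × String))
    (c : PySem.Dict String Int) (h : pvInv r done c) :
    pvInv (stor.foldl pvAStep r) (stor.foldl pvBStep (done, c)).1
      (stor.foldl pvBStep (done, c)).2 := by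
  induction stor generalizing r done c with
  | nil => exact h
  | cons j rest ih =>
    simp only [List.foldl_cons]
    have := pvInv_step r done c j h
    have heq : pvBStep (done, c) j = ((pvBStep (done, c) j).1, (pvBStep (done, c) j).2) := rfl
    rw [heq]
    exact ih _ _ _ this

-- ===== VERDICT (by name: the statement is the Claim_ definition above) =====
theorem get_storage_user_count_spec : Claim_equal_get_storage_user_count := by
  intro stor _ _
  unfold Spec_get_storage_user_count
  show ((stor.foldl pvAStep PySem.Dict.empty).items.foldl
      (fun c kv => c.insert kv.1 (PySem.Set.len kv.2)) PySem.Dict.empty).items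
    = (stor.foldl pvBStep ([], PySem.Dict.empty)).2.items
  have h0 : pvInv PySem.Dict.empty [] PySem.Dict.empty := by
    refine ⟨by simp [PySem.Dict.keys, PySem.Dict.empty], ?_, rfl⟩
    intro s u
    simp [PySem.Set.empty, PySem.Dict.getD_empty]
  have h := pvInv_fold stor PySem.Dict.empty [] PySem.Dict.empty h0
  obtain ⟨hnd, _, hitems⟩ := h
  have hfresh :
      (List.foldl (fun (c : PySem.Dict String Int) (kv : String × PySem.Set String) =>
          c.insert kv.1 (PySem.Set.len kv.2)) PySem.Dict.empty
        (stor.foldl pvAStep PySem.Dict.empty).items).items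
      = (PySem.Dict.empty : PySem.Dict String Int).items ++
        (stor.foldl pvAStep PySem.Dict.empty).items.map
          (fun a : String × PySem.Set String => (a.1, PySem.Set.len a.2)) :=
    PySem.Dict.items_foldl_insert_fresh (stor.foldl pvAStep PySem.Dict.empty).items
      (fun kv : String × PySem.Set String => kv.1)
      (fun kv : String × PySem.Set String => PySem.Set.len kv.2) PySem.Dict.empty
      (fun a _ => PySem.Dict.contains_empty _) (by simpa [PySem.Dict.keys] using hnd)
  rw [hfresh, hitems]
  rfl
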